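-- pv_equiv track=rewrite | github.com/joestacey/atomic_inference_anli | data_prep.py | remove_obs
-- ===== SOURCE A (Python) =====
-- def remove_obs(batch_sampler, indices_removed):
--
--     new_batch_sampler = []
--     prev_number = -1
--
--     for obs_no in range(len(batch_sampler)):
--         new_batch_sampler.append([])
--         for fact_no in batch_sampler[obs_no]:
--             if fact_no not in indices_removed:
--                 new_batch_sampler[obs_no].append(prev_number+1)
--                 prev_number += 1
--
--     return new_batch_sampler
-- ===== SOURCE B (Python) =====
-- def remove_obs(batch_sampler, indices_removed):
--     removed = set(indices_removed)
--     result = []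
--     start = 0
--     for obs in batch_sampler:
--         count = sum(1 for f in obs if f not in removed)
--         result.append(list(range(start, start + count)))
--         start += count
--     return result
-- ===== Notes on version B (the rewrite author's own statement) =====
-- stated objective: alternative
-- what changed: Replaces the element-by-element running counter with a per-observation survivor count plus a range(start, start+count) construction (membership via a prebuilt set).
import Mathlib
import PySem

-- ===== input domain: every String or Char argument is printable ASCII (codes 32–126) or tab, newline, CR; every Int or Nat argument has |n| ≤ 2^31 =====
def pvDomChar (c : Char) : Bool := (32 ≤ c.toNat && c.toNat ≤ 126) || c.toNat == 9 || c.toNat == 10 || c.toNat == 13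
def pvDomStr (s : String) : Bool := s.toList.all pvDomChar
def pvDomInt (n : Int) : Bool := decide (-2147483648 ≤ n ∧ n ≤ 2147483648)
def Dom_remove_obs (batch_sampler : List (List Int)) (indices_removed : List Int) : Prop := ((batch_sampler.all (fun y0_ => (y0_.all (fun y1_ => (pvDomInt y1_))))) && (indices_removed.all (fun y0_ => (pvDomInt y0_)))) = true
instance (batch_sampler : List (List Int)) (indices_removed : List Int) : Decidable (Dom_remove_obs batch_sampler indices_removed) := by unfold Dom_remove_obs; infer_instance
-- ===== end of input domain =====

-- B replaces A's element-by-element running counter with a per-observation survivor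
-- count and a range(start, start+count) construction (alternative decomposition).

-- ===== PORT A =====
-- inner loop body: 'if fact_no not in indices_removed: append(prev+1); prev += 1'
def removeObsInnerA (indices_removed : List Int) (st : List Int × Int) (fact_no : Int) : List Int × Int :=
  if fact_no ∈ indices_removed then st else (st.1 ++ [st.2 + 1], st.2 + 1)

def remove_obs (batch_sampler : List (List Int)) (indices_removed : List Int) : List (List Int) :=
  (batch_sampler.foldl
    (fun (st : List (List Int) × Int) obs =>
      let r := obs.foldl (removeObsInnerA indices_removed) ([], st.2)
      (st.1 ++ [r.1], r.2))
    ([], -1)).1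

-- ===== PORT B =====
def remove_obs_alt (batch_sampler : List (List Int)) (indices_removed : List Int) : List (List Int) :=
  let removed : PySem.Set Int := PySem.Set.ofList indices_removed
  (batch_sampler.foldl
    (fun (st : List (List Int) × Int) obs =>
      let count : Int := (obs.filter (fun f => !(PySem.Set.contains removed f))).length
      (st.1 ++ [PySem.List.pyRange st.2 (st.2 + count) 1], st.2 + count))
    ([], 0)).1

-- ===== PRECONDITION & SPEC =====
def Spec_remove_obs (batch_sampler : List (List Int)) (indices_removed : List Int) (out : List (List Int)) : Prop := out = remove_obs_alt batch_sampler indices_removed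
instance (batch_sampler : List (List Int)) (indices_removed : List Int) (out : List (List Int)) : Decidable (Spec_remove_obs batch_sampler indices_removed out) := by unfold Spec_remove_obs; infer_instance

-- ===== CLAIM (what is proved, stated in full; the proofs are below) =====
def Claim_equal_remove_obs : Prop := ∀ (batch_sampler : List (List Int)) (indices_removed : List Int), Dom_remove_obs batch_sampler indices_removed → Spec_remove_obs batch_sampler indices_removed (remove_obs batch_sampler indices_removed)

-- ===== LEMMAS AND PROOFS =====

-- A's inner loop from (row, prev) appends exactly the consecutive block of survivor ranks.
theorem removeObs_inner_eq (indices_removed : List Int) (obs : List Int) :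
    ∀ (row : List Int) (prev : Int),
      obs.foldl (removeObsInnerA indices_removed) (row, prev) =
        (row ++ PySem.List.pyRange (prev + 1)
            (prev + 1 + ((obs.filter (fun f => !(decide (f ∈ indices_removed)))).length : Int)) 1,
         prev + ((obs.filter (fun f => !(decide (f ∈ indices_removed)))).length : Int)) := by
  induction obs with
  | nil =>
      intro row prev
      simp [PySem.List.pyRange_one_eq_nil]
  | cons f t ih =>
      intro row prev
      by_cases h : f ∈ indices_removed
      · simp only [List.foldl_cons, removeObsInnerA, List.filter_cons, h,
          decide_true, Bool.not_true, if_true]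
        exact ih row prev
      · simp only [List.foldl_cons, removeObsInnerA, List.filter_cons, h,
          decide_false, Bool.not_false, if_false, if_true, List.length_cons]
        rw [ih (row ++ [prev + 1]) (prev + 1)]
        push_cast
        set c : Int := ((t.filter (fun f => !(decide (f ∈ indices_removed)))).length : Int) with hc
        have hc0 : 0 ≤ c := by rw [hc]; positivity
        have e1 : prev + 1 + (c + 1) = prev + 1 + 1 + c := by ring
        have e2 : prev + (c + 1) = prev + 1 + c := by ring
        rw [e1, e2]
        have hlt : prev + 1 < prev + 1 + 1 + c := by omega
        rw [PySem.List.pyRange_one_cons hlt, List.append_assoc, List.singleton_append]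

-- membership in the prebuilt set agrees with list membership
theorem set_contains_eq (indices_removed : List Int) (f : Int) :
    PySem.Set.contains (PySem.Set.ofList indices_removed) f = decide (f ∈ indices_removed) := by
  have := PySem.Set.mem_ofList (xs := indices_removed) (y := f)
  by_cases h : f ∈ indices_removed <;>
    simp [PySem.Set.contains, this, h]

-- the two outer folds, run from related states (B's start = A's prev + 1), agree
theorem removeObs_outer_eq (indices_removed : List Int) (batch_sampler : List (List Int)) :
    ∀ (acc : List (List Int)) (prev : Int),
      batch_sampler.foldl
        (fun (st : List (List Int) × Int) obs =>
          let r := obs.foldl (removeObsInnerA indices_removed) ([], st.2)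
          (st.1 ++ [r.1], r.2)) (acc, prev) =
      (let r := batch_sampler.foldl
          (fun (st : List (List Int) × Int) obs =>
            let count : Int := (obs.filter
                (fun f => !(PySem.Set.contains (PySem.Set.ofList indices_removed) f))).length
            (st.1 ++ [PySem.List.pyRange st.2 (st.2 + count) 1], st.2 + count)) (acc, prev + 1)
       (r.1, r.2 - 1)) := by
  induction batch_sampler with
  | nil => intro acc prev; simp
  | cons obs rest ih =>
      intro acc prev
      simp only [List.foldl_cons]
      rw [removeObs_inner_eq indices_removed obs [] prev]
      rw [ih]
      have hfix : (obs.filter (fun f => !(PySem.Set.contains (PySem.Set.ofList indices_removed) f)))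
          = obs.filter (fun f => !(decide (f ∈ indices_removed))) := by
        apply List.filter_congr
        intro x _
        rw [set_contains_eq]
      simp only [hfix, List.nil_append]
      have hc : prev + ((obs.filter (fun f => !(decide (f ∈ indices_removed)))).length : Int) + 1
          = prev + 1 + ((obs.filter (fun f => !(decide (f ∈ indices_removed)))).length : Int) := by
        ring
      rw [hc]

-- ===== VERDICT (by name: the statement is the Claim_ definition above) =====
theorem remove_obs_spec : Claim_equal_remove_obs := by
  intro batch_sampler indices_removed _
  unfold Spec_remove_obs remove_obs remove_obs_alt
  rw [removeObs_outer_eq]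
  norm_num
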